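-- pv_equiv track=rewrite | github.com/Corneille9/Ultimate_Tic_Tac_Toe | Check_game.py | get_next_box
-- ===== SOURCE A (Python) =====
-- def get_next_box(x, y):
--     for i in range(0, 7, 3):
--         for j in range(0, 7, 3):
--             if (x, y) == (i, j):
--                 possible_moves = []
--                 for k in range(3):
--                     for h in range(3):
--                         possible_moves.append([k, h])
--                 return possible_moves
--
--     for i in range(0, 7, 3):
--         for j in range(1, 8, 3):
--             if (x, y) == (i, j):
--                 possible_moves = []
--                 for k in range(3):
--                     for h in range(3, 6):
--                         possible_moves.append([k, h])
--                 return possible_moves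
--
--     for i in range(0, 7, 3):
--         for j in range(2, 9, 3):
--             if (x, y) == (i, j):
--                 possible_moves = []
--                 for k in range(3):
--                     for h in range(6, 9):
--                         possible_moves.append([k, h])
--                 return possible_moves
--
--     for i in range(1, 8, 3):
--         for j in range(0, 7, 3):
--             if (x, y) == (i, j):
--                 possible_moves = []
--                 for k in range(3, 6):
--                     for h in range(3):
--                         possible_moves.append([k, h])
--                 return possible_moves
--
--     for i in range(1, 8, 3):
--         for j in range(1, 8, 3):
--             if (x, y) == (i, j):
--                 possible_moves = []
--                 for k in range(3, 6):
--                     for h in range(3, 6):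
--                         possible_moves.append([k, h])
--                 return possible_moves
--
--     for i in range(1, 8, 3):
--         for j in range(2, 9, 3):
--             if (x, y) == (i, j):
--                 possible_moves = []
--                 for k in range(3, 6):
--                     for h in range(6, 9):
--                         possible_moves.append([k, h])
--                 return possible_moves
--
--     for i in range(2, 9, 3):
--         for j in range(0, 9, 3):
--             if (x, y) == (i, j):
--                 possible_moves = []
--                 for k in range(6, 9):
--                     for h in range(3):
--                         possible_moves.append([k, h])
--                 return possible_moves
--
--     for i in range(2, 9, 3):
--         for j in range(1, 9, 3):
--             if (x, y) == (i, j):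
--                 possible_moves = []
--                 for k in range(6, 9):
--                     for h in range(3, 6):
--                         possible_moves.append([k, h])
--                 return possible_moves
--
--     for i in range(2, 9, 3):
--         for j in range(2, 9, 3):
--             if (x, y) == (i, j):
--                 possible_moves = []
--
--                 for k in range(6, 9):
--                     for h in range(6, 9):
--                         possible_moves.append([k, h])
--                 return possible_moves
-- ===== SOURCE B (Python) =====
-- def get_next_box(x, y):
--     if x in range(9) and y in range(9):
--         xi, yi = int(x), int(y)
--         kb, hb = (xi % 3) * 3, (yi % 3) * 3
--         return [[k, h] for k in range(kb, kb + 3) for h in range(hb, hb + 3)]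
-- ===== Notes on version B (the rewrite author's own statement) =====
-- stated objective: simpler
-- what changed: Replaces nine sequential nested coordinate scans (one per 3x3 block) with one closed-form computation: the block base offsets are (x%3)*3 and (y%3)*3 and the block is a single comprehension.
-- outside the precondition, e.g. on get_next_box(9, 0): A returns None, B returns None; on get_next_box(-1, 2): A returns None, B returns None
import Mathlib
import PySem

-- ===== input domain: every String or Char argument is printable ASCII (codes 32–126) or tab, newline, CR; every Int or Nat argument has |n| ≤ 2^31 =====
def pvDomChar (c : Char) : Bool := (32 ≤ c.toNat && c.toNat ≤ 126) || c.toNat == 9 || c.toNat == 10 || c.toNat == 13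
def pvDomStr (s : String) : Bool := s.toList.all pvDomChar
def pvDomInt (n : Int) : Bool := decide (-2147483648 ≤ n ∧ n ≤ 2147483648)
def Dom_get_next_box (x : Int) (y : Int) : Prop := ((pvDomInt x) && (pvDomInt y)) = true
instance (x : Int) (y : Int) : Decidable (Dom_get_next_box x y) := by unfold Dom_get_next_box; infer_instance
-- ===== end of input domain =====

-- B replaces A's nine sequential nested block scans with one closed-form block computation from (x%3, y%3); simpler.


-- ===== PORT A =====
-- A tests (x,y) against each of the nine 3x3 coordinate groups in turn; on a match it
-- builds the block by nested loops. A's membership loops are ported as `.any` over the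
-- same pyRange lists, the block-building loops as flatMap/map over the same pyRange lists.
def pvBlockA (ks hs : List Int) : List (List Int) :=
  ks.flatMap (fun k => hs.map (fun h => [k, h]))

def get_next_box (x : Int) (y : Int) : List (List Int) :=
  if (PySem.List.pyRange 0 7 3).any (fun i => (PySem.List.pyRange 0 7 3).any (fun j => x == i && y == j)) then
    pvBlockA (PySem.List.pyRange 0 3 1) (PySem.List.pyRange 0 3 1)
  else if (PySem.List.pyRange 0 7 3).any (fun i => (PySem.List.pyRange 1 8 3).any (fun j => x == i && y == j)) then
    pvBlockA (PySem.List.pyRange 0 3 1) (PySem.List.pyRange 3 6 1)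
  else if (PySem.List.pyRange 0 7 3).any (fun i => (PySem.List.pyRange 2 9 3).any (fun j => x == i && y == j)) then
    pvBlockA (PySem.List.pyRange 0 3 1) (PySem.List.pyRange 6 9 1)
  else if (PySem.List.pyRange 1 8 3).any (fun i => (PySem.List.pyRange 0 7 3).any (fun j => x == i && y == j)) then
    pvBlockA (PySem.List.pyRange 3 6 1) (PySem.List.pyRange 0 3 1)
  else if (PySem.List.pyRange 1 8 3).any (fun i => (PySem.List.pyRange 1 8 3).any (fun j => x == i && y == j)) then
    pvBlockA (PySem.List.pyRange 3 6 1) (PySem.List.pyRange 3 6 1)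
  else if (PySem.List.pyRange 1 8 3).any (fun i => (PySem.List.pyRange 2 9 3).any (fun j => x == i && y == j)) then
    pvBlockA (PySem.List.pyRange 3 6 1) (PySem.List.pyRange 6 9 1)
  else if (PySem.List.pyRange 2 9 3).any (fun i => (PySem.List.pyRange 0 9 3).any (fun j => x == i && y == j)) then
    pvBlockA (PySem.List.pyRange 6 9 1) (PySem.List.pyRange 0 3 1)
  else if (PySem.List.pyRange 2 9 3).any (fun i => (PySem.List.pyRange 1 9 3).any (fun j => x == i && y == j)) then
    pvBlockA (PySem.List.pyRange 6 9 1) (PySem.List.pyRange 3 6 1)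
  else if (PySem.List.pyRange 2 9 3).any (fun i => (PySem.List.pyRange 2 9 3).any (fun j => x == i && y == j)) then
    pvBlockA (PySem.List.pyRange 6 9 1) (PySem.List.pyRange 6 9 1)
  else []  -- Python falls through and returns None here; excluded by Pre_get_next_box

-- ===== PORT B =====
def get_next_box_alt (x : Int) (y : Int) : List (List Int) :=
  if 0 ≤ x ∧ x < 9 ∧ 0 ≤ y ∧ y < 9 then
    let kb := PySem.Int.mod x 3 * 3
    let hb := PySem.Int.mod y 3 * 3
    (PySem.List.pyRange kb (kb + 3) 1).flatMap
      (fun k => (PySem.List.pyRange hb (hb + 3) 1).map (fun h => [k, h]))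
  else []  -- Python B returns None here; excluded by Pre_get_next_box

-- ===== PRECONDITION & SPEC =====
-- Pre_ excludes exactly the inputs outside the 9x9 board, on which Python A falls off the
-- end and returns None — not a value of the declared list type.
def Pre_get_next_box (x : Int) (y : Int) : Prop := 0 ≤ x ∧ x < 9 ∧ 0 ≤ y ∧ y < 9
instance (x : Int) (y : Int) : Decidable (Pre_get_next_box x y) := by unfold Pre_get_next_box; infer_instance
def pvWitness_get_next_box : Int × Int := (4, 7)

def Spec_get_next_box (x : Int) (y : Int) (out : List (List Int)) : Prop := out = get_next_box_alt x y
instance (x : Int) (y : Int) (out : List (List Int)) : Decidable (Spec_get_next_box x y out) := by unfold Spec_get_next_box; infer_instance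

-- ===== CLAIM (what is proved, stated in full; the proofs are below) =====
def Claim_equal_get_next_box : Prop := ∀ (x : Int) (y : Int), Dom_get_next_box x y → Pre_get_next_box x y → Spec_get_next_box x y (get_next_box x y)

-- ===== LEMMAS AND PROOFS =====

-- ===== VERDICT (by name: the statement is the Claim_ definition above) =====
theorem get_next_box_spec : Claim_equal_get_next_box := by
  intro x y _ hpre
  obtain ⟨hx0, hx9, hy0, hy9⟩ := hpre
  unfold Spec_get_next_box
  interval_cases x <;> interval_cases y <;> decide
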